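-- pv_equiv track=rewrite | github.com/flext-sh/flext-infra | src/flext_infra/_utilities/rope_helpers.py | _bracket_balance_line
-- ===== SOURCE A (Python) =====
-- def _bracket_balance_line(line: str) -> int:
--     delta = 0
--     in_single = False
--     in_double = False
--     escape = False
--     for ch in line:
--         if escape:
--             escape = False
--             continue
--         if ch == "\\":
--             escape = True
--             continue
--         if in_single:
--             if ch == "'":
--                 in_single = False
--             continue
--         if in_double:
--             if ch == '"':
--                 in_double = False
--             continue
--         if ch == "#":
--             break
--         if ch == "'":
--             in_single = True
--             continue
--         if ch == '"':
--             in_double = True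
--             continue
--         if ch in "([{":
--             delta += 1
--         elif ch in ")]}":
--             delta -= 1
--     return delta
-- ===== SOURCE B (Python) =====
-- def _bracket_balance_line(line: str) -> int:
--     n = len(line)
--
--     def skip_string(i: int, quote: str) -> int:
--         # consume the body of a string literal; return index just past the
--         # closing quote (or past the end if unterminated)
--         while i < n:
--             c = line[i]
--             if c == "\\":
--                 i += 2
--             elif c == quote:
--                 return i + 1
--             else:
--                 i += 1
--         return i
--
--     delta = 0
--     i = 0
--     while i < n:
--         c = line[i]
--         if c == "\\":
--             i += 2
--         elif c == "#":
--             break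
--         elif c == "'" or c == '"':
--             i = skip_string(i + 1, c)
--         else:
--             if c in "([{":
--                 delta += 1
--             elif c in ")]}":
--                 delta -= 1
--             i += 1
--     return delta
-- ===== Notes on version B (the rewrite author's own statement) =====
-- stated objective: alternative
-- what changed: Replaces A's char-by-char state machine with four boolean flags by a token-consuming scan: whole string literals are swallowed by a dedicated sub-scan and escape pairs are consumed two characters at a time, so no in_single/in_double/escape state survives across loop iterations.
import Mathlib
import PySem

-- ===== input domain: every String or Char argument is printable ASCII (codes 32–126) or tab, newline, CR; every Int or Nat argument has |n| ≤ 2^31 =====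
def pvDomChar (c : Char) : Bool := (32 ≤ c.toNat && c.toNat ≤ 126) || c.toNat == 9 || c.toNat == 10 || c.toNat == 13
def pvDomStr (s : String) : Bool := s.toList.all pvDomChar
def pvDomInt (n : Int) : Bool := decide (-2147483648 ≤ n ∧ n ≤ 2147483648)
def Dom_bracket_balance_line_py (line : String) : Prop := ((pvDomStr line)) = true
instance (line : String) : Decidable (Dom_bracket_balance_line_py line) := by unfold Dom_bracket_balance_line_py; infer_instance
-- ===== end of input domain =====

-- B replaces A's flag state machine by a token-consuming scan (whole string
-- literals swallowed by a sub-scan, escape pairs consumed two chars at a time);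
-- objective: alternative structure, same cost.

-- ===== PORT A =====
-- literal port of A's loop: state (delta, in_single, in_double, escape)
def goA : List Char → Int → Bool → Bool → Bool → Int
  | [], delta, _, _, _ => delta
  | ch :: rest, delta, s, d, e =>
    if e then goA rest delta s d false
    else if ch = '\\' then goA rest delta s d true
    else if s then goA rest delta (if ch = '\'' then false else true) d false
    else if d then goA rest delta s (if ch = '"' then false else true) false
    else if ch = '#' then delta
    else if ch = '\'' then goA rest delta true d false
    else if ch = '"' then goA rest delta s true false
    else if ch = '(' ∨ ch = '[' ∨ ch = '{' then goA rest (delta + 1) s d false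
    else if ch = ')' ∨ ch = ']' ∨ ch = '}' then goA rest (delta - 1) s d false
    else goA rest delta s d false

def bracket_balance_line_py (line : String) : Int :=
  goA line.toList 0 false false false

-- ===== PORT B =====
-- consume the body of a string literal (escape pairs skipped), return the tail
-- just past the closing quote (or [] if unterminated)
def skipStr (q : Char) : List Char → List Char
  | [] => []
  | c :: rest =>
    if c = '\\' then
      match rest with
      | [] => []
      | _ :: r => skipStr q r
    else if c = q then rest
    else skipStr q rest

-- unfolding equation for skipStr on a cons cell (needed below and for goB's termination)
theorem skipStr_cons (q c : Char) (rest : List Char) :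
    skipStr q (c :: rest) =
      if c = '\\' then (match rest with | [] => [] | _ :: r => skipStr q r)
      else if c = q then rest
      else skipStr q rest := by
  rw [skipStr.eq_def]

theorem skipStr_length_le : ∀ (n : Nat) (xs : List Char) (q : Char), xs.length ≤ n →
    (skipStr q xs).length ≤ xs.length := by
  intro n
  induction n with
  | zero =>
    intro xs q h
    have : xs = [] := List.length_eq_zero_iff.mp (Nat.le_zero.mp h)
    subst this; simp [skipStr]
  | succ n ih =>
    intro xs q h
    match xs with
    | [] => simp [skipStr]
    | c :: rest =>
      have hr : rest.length ≤ n := by simpa using h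
      by_cases hb : c = '\\'
      · match rest with
        | [] => simp [skipStr_cons, hb]
        | r0 :: r =>
          have := ih r q (by simp at hr; omega)
          simp [skipStr_cons, hb]; omega
      · by_cases hq : c = q
        · subst hq; simp [skipStr_cons, hb]
        · have := ih rest q hr
          simp [skipStr_cons, hb, hq]; omega

def goB : List Char → Int
  | [] => 0
  | c :: rest =>
    if c = '\\' then
      match rest with
      | [] => 0
      | _ :: r => goB r
    else if c = '#' then 0
    else if c = '\'' then goB (skipStr '\'' rest)
    else if c = '"' then goB (skipStr '"' rest)
    else (if c = '(' ∨ c = '[' ∨ c = '{' then (1 : Int)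
          else if c = ')' ∨ c = ']' ∨ c = '}' then -1 else 0) + goB rest
termination_by cs => cs.length
decreasing_by
  all_goals try simp
  all_goals exact skipStr_length_le rest.length rest _ le_rfl

def bracket_balance_line_py_alt (line : String) : Int :=
  goB line.toList

-- ===== PRECONDITION & SPEC =====
def Spec_bracket_balance_line_py (line : String) (out : Int) : Prop := out = bracket_balance_line_py_alt line
instance (line : String) (out : Int) : Decidable (Spec_bracket_balance_line_py line out) := by unfold Spec_bracket_balance_line_py; infer_instance

-- ===== CLAIM (what is proved, stated in full; the proofs are below) =====
def Claim_equal_bracket_balance_line_py : Prop := ∀ (line : String), Dom_bracket_balance_line_py line → Spec_bracket_balance_line_py line (bracket_balance_line_py line)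

-- ===== LEMMAS AND PROOFS =====

-- unfolding equation for goB on a cons cell
theorem goB_cons (c : Char) (rest : List Char) :
    goB (c :: rest) =
      if c = '\\' then (match rest with | [] => 0 | _ :: r => goB r)
      else if c = '#' then 0
      else if c = '\'' then goB (skipStr '\'' rest)
      else if c = '"' then goB (skipStr '"' rest)
      else (if c = '(' ∨ c = '[' ∨ c = '{' then (1 : Int)
            else if c = ')' ∨ c = ']' ∨ c = '}' then -1 else 0) + goB rest := by
  rw [goB.eq_def]

-- A in the neutral / in-single / in-double state equals B on the remaining
-- characters (resp. on the tail past the pending string literal).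
theorem goA_goB (n : Nat) : ∀ (cs : List Char), cs.length ≤ n → ∀ (δ : Int),
    goA cs δ false false false = δ + goB cs
  ∧ goA cs δ true false false = δ + goB (skipStr '\'' cs)
  ∧ goA cs δ false true false = δ + goB (skipStr '"' cs) := by
  induction n with
  | zero =>
    intro cs h δ
    have : cs = [] := List.length_eq_zero_iff.mp (Nat.le_zero.mp h)
    subst this
    simp [goA, goB, skipStr]
  | succ n ih =>
    intro cs h δ
    match cs with
    | [] => simp [goA, goB, skipStr]
    | c :: rest =>
      have hr : rest.length ≤ n := by simpa using h
      by_cases hb : c = '\\'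
      · subst hb
        match rest with
        | [] =>
          refine ⟨?_, ?_, ?_⟩ <;> simp [goA, goB_cons, skipStr_cons, goB]
        | r0 :: r =>
          have hr2 : r.length ≤ n := by simp at hr; omega
          refine ⟨?_, ?_, ?_⟩ <;>
            simp [goA, goB_cons, skipStr_cons, (ih r hr2 δ).1, (ih r hr2 δ).2.1,
              (ih r hr2 δ).2.2]
      · by_cases hq : c = '\''
        · subst hq
          refine ⟨?_, ?_, ?_⟩ <;>
            simp [goA, goB_cons, skipStr_cons, (ih rest hr δ).1, (ih rest hr δ).2.1,
              (ih rest hr δ).2.2]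
        · by_cases hd : c = '"'
          · subst hd
            refine ⟨?_, ?_, ?_⟩ <;>
              simp [goA, goB_cons, skipStr_cons, (ih rest hr δ).1, (ih rest hr δ).2.1,
                (ih rest hr δ).2.2]
          · by_cases hh : c = '#'
            · subst hh
              refine ⟨?_, ?_, ?_⟩ <;>
                simp [goA, goB_cons, skipStr_cons, (ih rest hr δ).2.1, (ih rest hr δ).2.2]
            · have h1 := (ih rest hr δ).1
              have h2 := (ih rest hr δ).2.1
              have h3 := (ih rest hr δ).2.2
              have h1p := (ih rest hr (δ + 1)).1
              have h1m := (ih rest hr (δ - 1)).1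
              refine ⟨?_, ?_, ?_⟩
              · by_cases ho : c = '(' ∨ c = '[' ∨ c = '{'
                · simp [goA, goB_cons, hb, hq, hd, hh, ho, h1p]; omega
                · by_cases hc : c = ')' ∨ c = ']' ∨ c = '}'
                  · simp [goA, goB_cons, hb, hq, hd, hh, ho, hc, h1m]; omega
                  · simp [goA, goB_cons, hb, hq, hd, hh, ho, hc, h1]
              · simp [goA, skipStr_cons, hb, hq, h2]
              · simp [goA, skipStr_cons, hb, hd, h3]

-- ===== VERDICT (by name: the statement is the Claim_ definition above) =====
theorem bracket_balance_line_py_spec : Claim_equal_bracket_balance_line_py := by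
  intro line _
  unfold Spec_bracket_balance_line_py bracket_balance_line_py bracket_balance_line_py_alt
  have := (goA_goB line.toList.length line.toList le_rfl 0).1
  omega
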